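-- pv_equiv track=rewrite | github.com/soulchicken/TIL-ver-0.0 | BootCamp_PlayData/AlgorithmStudy/1week_stack_queue/기능개발.py | solution
-- ===== SOURCE A (Python) =====
-- def solution(progresses, speeds):
--     from math import ceil
--     from collections import deque
--     answer = []
--     queue = deque()
--     for i in range(len(progresses)):
--         queue.append( ceil ((100 - progresses[i]) / speeds[i]) )
--     while queue:
--         n = queue.popleft()
--         count = 1
--         while queue and queue[0] <= n:
--             count += 1
--             queue.popleft()
--         answer.append(count)
--     return answer
-- ===== SOURCE B (Python) =====
-- from math import ceil
--
-- def solution(progresses, speeds):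
--     days = [ceil((100 - p) / s) for p, s in zip(progresses, speeds)]
--     if not days:
--         return []
--     answer = []
--     leader = days[0]
--     count = 1
--     for d in days[1:]:
--         if d <= leader:
--             count += 1
--         else:
--             answer.append(count)
--             leader = d
--             count = 1
--     answer.append(count)
--     return answer
-- ===== Notes on version B (the rewrite author's own statement) =====
-- stated objective: simpler
-- what changed: Replaces the deque with nested popleft/while draining by a flat days list and one linear scan keeping a running leader and group count.
import Mathlib
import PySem

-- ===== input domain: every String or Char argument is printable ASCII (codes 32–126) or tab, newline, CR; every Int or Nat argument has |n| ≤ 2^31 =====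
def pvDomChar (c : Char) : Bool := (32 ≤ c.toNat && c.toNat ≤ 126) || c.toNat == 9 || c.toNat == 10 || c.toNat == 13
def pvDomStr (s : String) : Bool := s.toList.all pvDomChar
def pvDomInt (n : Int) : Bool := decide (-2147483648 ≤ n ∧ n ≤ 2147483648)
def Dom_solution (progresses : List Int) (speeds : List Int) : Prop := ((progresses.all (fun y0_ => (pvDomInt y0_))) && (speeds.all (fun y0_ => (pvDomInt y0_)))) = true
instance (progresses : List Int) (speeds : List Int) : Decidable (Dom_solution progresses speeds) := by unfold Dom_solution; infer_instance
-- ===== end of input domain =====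

-- B replaces A's deque draining (nested while/popleft) by one linear scan over a flat
-- days list with a running leader and group count: simpler decomposition, same O(n) cost.

-- math.ceil((100-p)/s) on integers: exact as ceiling division -((-a) // b); on Dom
-- (|values| ≤ 2^31) Python's correctly-rounded float division cannot cross an integer,
-- so this integer form is exact. Shared by both ports (both Pythons compute this ceil).
def pyCeilDiv (a b : Int) : Int := -(PySem.Int.floordiv (-a) b)

-- ===== PORT A =====
-- inner 'while queue and queue[0] <= n': drains the ≤-n prefix, returns (#popped, rest)
def drainA (n : Int) : List Int → Int × List Int
  | [] => (0, [])
  | d :: t => if d ≤ n then ((drainA n t).1 + 1, (drainA n t).2) else (0, d :: t)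

theorem drainA_length (n : Int) (l : List Int) : (drainA n l).2.length ≤ l.length := by
  induction l with
  | nil => simp [drainA]
  | cons d t ih => simp only [drainA]; split_ifs <;> simp <;> omega


-- outer 'while queue': n = popleft, count = 1 + drained, append count
def groupsA : List Int → List Int
  | [] => []
  | n :: rest => (1 + (drainA n rest).1) :: groupsA (drainA n rest).2
termination_by l => l.length
decreasing_by exact Nat.lt_succ_of_le (drainA_length n rest)

def solution (progresses : List Int) (speeds : List Int) : List Int :=
  let queue := (List.range progresses.length).foldl
    (fun q (i : Nat) => q ++ [pyCeilDiv (100 - PySem.List.pyGetD progresses (i : Int) 0)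
                                (PySem.List.pyGetD speeds (i : Int) 0)]) []
  groupsA queue

-- ===== PORT B =====
-- the body of B's for-loop: state (leader, count, answer)
def bstep (st : Int × Int × List Int) (d : Int) : Int × Int × List Int :=
  if d ≤ st.1 then (st.1, st.2.1 + 1, st.2.2) else (d, 1, st.2.2 ++ [st.2.1])

def solution_alt (progresses : List Int) (speeds : List Int) : List Int :=
  let days := (progresses.zip speeds).map (fun pr => pyCeilDiv (100 - pr.1) pr.2)
  match days with
  | [] => []
  | d0 :: rest =>
      let st := rest.foldl bstep (d0, 1, [])
      st.2.2 ++ [st.2.1]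

-- ===== PRECONDITION & SPEC =====
-- Pre_ excludes exactly the inputs where Python A raises: speeds shorter than
-- progresses (IndexError) or a zero speed among the used ones (ZeroDivisionError).
def Pre_solution (progresses : List Int) (speeds : List Int) : Prop :=
  progresses.length ≤ speeds.length ∧ ∀ x ∈ speeds.take progresses.length, x ≠ 0
instance (progresses : List Int) (speeds : List Int) : Decidable (Pre_solution progresses speeds) := by unfold Pre_solution; infer_instance
def pvWitness_solution : List Int × List Int := ([93, 30, 55], [1, 30, 5])

def Spec_solution (progresses : List Int) (speeds : List Int) (out : List Int) : Prop := out = solution_alt progresses speeds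
instance (progresses : List Int) (speeds : List Int) (out : List Int) : Decidable (Spec_solution progresses speeds out) := by unfold Spec_solution; infer_instance

-- ===== CLAIM (what is proved, stated in full; the proofs are below) =====
def Claim_equal_solution : Prop := ∀ (progresses : List Int) (speeds : List Int), Dom_solution progresses speeds → Pre_solution progresses speeds → Spec_solution progresses speeds (solution progresses speeds)

-- ===== LEMMAS AND PROOFS =====

theorem pyGetD_cons_succ' (x : Int) (xs : List Int) (j : Nat) :
    PySem.List.pyGetD (x :: xs) ((j : Int) + 1) 0 = xs[j]?.getD 0 := by
  have h : ((j : Int) + 1) = ((j + 1 : Nat) : Int) := by push_cast; ring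
  rw [h, PySem.List.pyGetD_natCast]
  simp [List.getD]

-- A's queue-building loop equals B's days list when speeds is long enough
theorem days_eq (p s : List Int) (h : p.length ≤ s.length) :
    (List.range p.length).map
      (fun (i : Nat) => pyCeilDiv (100 - PySem.List.pyGetD p (i : Int) 0)
                          (PySem.List.pyGetD s (i : Int) 0))
    = (p.zip s).map (fun pr => pyCeilDiv (100 - pr.1) pr.2) := by
  induction p generalizing s with
  | nil => simp
  | cons a p' ih =>
      cases s with
      | nil => simp at h
      | cons b s' =>
          simp only [List.length_cons, List.range_succ_eq_map, List.map_cons, List.map_map,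
            List.zip_cons_cons]
          congr 1
          · simp
          · have := ih s' (by simpa using h)
            rw [← this]
            apply List.map_congr_left
            intro i hi
            simp only [Function.comp]
            congr 1 <;> simp [pyGetD_cons_succ']

-- B's scan over 'rest' with state (n, k, acc) produces acc ++ A's grouping of the block
theorem loopB (rest : List Int) : ∀ (n k : Int) (acc : List Int),
    (rest.foldl bstep (n, k, acc)).2.2 ++ [(rest.foldl bstep (n, k, acc)).2.1]
    = acc ++ ((k + (drainA n rest).1) :: groupsA (drainA n rest).2) := by
  induction rest with
  | nil => intro n k acc; simp [drainA, groupsA]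
  | cons d t ih =>
      intro n k acc
      by_cases hd : d ≤ n
      · simp only [List.foldl_cons, bstep, if_pos hd, drainA]
        have h2 : k + 1 + (drainA n t).1 = k + ((drainA n t).1 + 1) := by ring
        rw [ih n (k + 1) acc, h2]
      · simp only [List.foldl_cons, bstep, if_neg hd, drainA]
        rw [ih d 1 (acc ++ [k])]
        simp [groupsA]

theorem groups_eq (days : List Int) :
    groupsA days = (match days with
      | [] => ([] : List Int)
      | d0 :: rest =>
          let st := rest.foldl bstep (d0, 1, [])
          st.2.2 ++ [st.2.1]) := by
  cases days with
  | nil => simp [groupsA]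
  | cons d0 rest =>
      simp only []
      rw [loopB rest d0 1 []]
      simp [groupsA]

-- ===== VERDICT (by name: the statement is the Claim_ definition above) =====
theorem solution_spec : Claim_equal_solution := by
  intro p s _ hpre
  unfold Spec_solution solution solution_alt
  rw [PySem.List.foldl_append_singleton_eq_map]
  simp only [List.nil_append]
  rw [days_eq p s hpre.1]
  exact groups_eq _
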